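-- pv_equiv track=rewrite | github.com/bradparks/ovc-2016-videos | analysis/match_timestamps.py | map_terms_to_timestamps
-- ===== SOURCE A (Python) =====
-- def map_terms_to_timestamps(lines):
--     terms_to_timestamps = {}
--     for line in lines:
--         timestamp = line[0]
--         tokens = line[1]
--         for token in tokens:
--             if token in terms_to_timestamps:
--                 if timestamp not in terms_to_timestamps[token]:
--                     terms_to_timestamps[token].append(timestamp)
--             else:
--                 terms_to_timestamps[token] = [timestamp]
--
--     return terms_to_timestamps
-- ===== SOURCE B (Python) =====
-- def map_terms_to_timestamps(lines):
--     buckets = {}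
--     for timestamp, tokens in lines:
--         for token in tokens:
--             buckets.setdefault(token, []).append(timestamp)
--     return {token: list(dict.fromkeys(ts)) for token, ts in buckets.items()}
-- ===== Notes on version B (the rewrite author's own statement) =====
-- stated objective: alternative
-- what changed: A's single interleaved pass with an inner list-membership scan before each append is split into a build phase collecting every timestamp per token (duplicates included) and a second hash-based dedup pass via dict.fromkeys over the assembled buckets.
import Mathlib
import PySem

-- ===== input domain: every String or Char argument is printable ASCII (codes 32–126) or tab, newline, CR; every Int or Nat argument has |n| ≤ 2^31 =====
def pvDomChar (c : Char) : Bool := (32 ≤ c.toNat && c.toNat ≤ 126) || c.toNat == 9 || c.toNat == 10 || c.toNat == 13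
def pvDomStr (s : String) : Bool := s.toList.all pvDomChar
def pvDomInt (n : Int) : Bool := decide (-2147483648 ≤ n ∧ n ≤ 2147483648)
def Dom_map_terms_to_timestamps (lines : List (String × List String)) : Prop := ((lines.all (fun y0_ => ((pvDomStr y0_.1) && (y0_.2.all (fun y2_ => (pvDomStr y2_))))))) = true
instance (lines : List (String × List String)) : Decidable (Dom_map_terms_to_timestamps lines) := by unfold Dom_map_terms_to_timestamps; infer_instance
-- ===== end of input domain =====

-- B splits A's single interleaved pass (inner membership check on each append) into a build
-- phase that collects every timestamp per token and a second dedup pass (dict.fromkeys);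
-- objective: alternative decomposition, same results.

-- ===== PORT A =====
def map_terms_to_timestamps (lines : List (String × List String)) : List (String × List String) :=
  (lines.foldl (fun d line =>
      line.2.foldl (fun d token =>
        if d.contains token then
          if (d.getD token []).contains line.1 then d
          else d.insert token (d.getD token [] ++ [line.1])
        else d.insert token [line.1]) d)
    PySem.Dict.empty).items

-- ===== PORT B =====
def map_terms_to_timestamps_alt (lines : List (String × List String)) : List (String × List String) :=
  let buckets := lines.foldl (fun d line =>
      line.2.foldl (fun d token => d.modify token [] (fun ts => ts ++ [line.1])) d)
    (PySem.Dict.empty : PySem.Dict String (List String))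
  buckets.items.map (fun p => (p.1, PySem.List.dedup p.2))

-- ===== PRECONDITION & SPEC =====
def Spec_map_terms_to_timestamps (lines : List (String × List String)) (out : List (String × List String)) : Prop := out = map_terms_to_timestamps_alt lines
instance (lines : List (String × List String)) (out : List (String × List String)) : Decidable (Spec_map_terms_to_timestamps lines out) := by unfold Spec_map_terms_to_timestamps; infer_instance

-- ===== CLAIM (what is proved, stated in full; the proofs are below) =====
def Claim_equal_map_terms_to_timestamps : Prop := ∀ (lines : List (String × List String)), Dom_map_terms_to_timestamps lines → Spec_map_terms_to_timestamps lines (map_terms_to_timestamps lines)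

-- ===== LEMMAS AND PROOFS =====

-- dedupMap d : the dict with every value list deduplicated (B's second pass, at dict level)
def dedupMap (d : PySem.Dict String (List String)) : PySem.Dict String (List String) :=
  PySem.Dict.mk (d.items.map (fun p => (p.1, PySem.List.dedup p.2)))

lemma keys_dedupMap (d : PySem.Dict String (List String)) : (dedupMap d).keys = d.keys := by
  simp [dedupMap, PySem.Dict.keys]

lemma contains_dedupMap (d : PySem.Dict String (List String)) (k : String) :
    (dedupMap d).contains k = d.contains k := by
  simp [dedupMap, PySem.Dict.contains, List.any_map, Function.comp_def]

lemma get?_dedupMap (d : PySem.Dict String (List String)) (k : String) :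
    (dedupMap d).get? k = (d.get? k).map PySem.List.dedup := by
  simp only [dedupMap, PySem.Dict.get?, List.find?_map, Function.comp_def]
  cases List.find? (fun p => p.1 == k) d.items <;> simp

lemma items_dedupMap (d : PySem.Dict String (List String)) :
    (dedupMap d).items = d.items.map (fun p => (p.1, PySem.List.dedup p.2)) := rfl

lemma dedupMap_insert (d : PySem.Dict String (List String)) (k : String) (v : List String) :
    dedupMap (d.insert k v) = (dedupMap d).insert k (PySem.List.dedup v) := by
  apply PySem.Dict.ext
  rw [items_dedupMap, PySem.Dict.items_insert, PySem.Dict.items_insert, contains_dedupMap,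
    items_dedupMap]
  by_cases hc : d.contains k
  · rw [if_pos hc, if_pos hc, List.map_map, List.map_map]
    apply List.map_congr_left
    intro p _
    by_cases h : p.1 = k <;> simp [h]
  · rw [if_neg hc, if_neg hc, List.map_append]
    simp

lemma insert_self (d : PySem.Dict String (List String)) (k : String) (v : List String)
    (hnd : d.keys.Nodup) (h : d.get? k = some v) : d.insert k v = d := by
  have hmem : (k, v) ∈ d.items := PySem.Dict.mem_items_of_get?_eq_some d h
  have hc : d.contains k = true := by rw [PySem.Dict.contains_eq_isSome_get?, h]; rfl
  apply PySem.Dict.ext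
  rw [PySem.Dict.items_insert, if_pos hc]
  conv_rhs => rw [← List.map_id d.items]
  apply List.map_congr_left
  intro p hp
  by_cases hk : (p.1 == k)
  · have hpk : p = (k, v) :=
      List.inj_on_of_nodup_map (by simpa [PySem.Dict.keys] using hnd) hp hmem
        (by simpa using eq_of_beq hk)
    simp [hpk]
  · simp [hk]

lemma dedup_append_singleton (l : List String) (x : String) :
    PySem.List.dedup (l ++ [x]) =
      if x ∈ l then PySem.List.dedup l else PySem.List.dedup l ++ [x] := by
  have hmem : x ∈ PySem.List.dedup l ↔ x ∈ l := PySem.List.mem_dedup l x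
  simp only [PySem.List.dedup] at *
  rw [PySem.Set.ofList_append, PySem.Set.update_cons, PySem.Set.update_nil, PySem.Set.add]
  by_cases h : x ∈ l
  · rw [if_pos (by simpa [List.contains_iff_mem] using hmem.mpr h), if_pos h]
  · rw [if_neg (by simpa [List.contains_iff_mem] using fun hx => h (hmem.mp hx)), if_neg h]

-- one token step: A's step on dedupMap b equals dedupMap of B's step on b
lemma step_comm (ts : String) (b : PySem.Dict String (List String)) (token : String)
    (hnd : b.keys.Nodup) :
    (if (dedupMap b).contains token then
        if ((dedupMap b).getD token []).contains ts then dedupMap b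
        else (dedupMap b).insert token ((dedupMap b).getD token [] ++ [ts])
      else (dedupMap b).insert token [ts])
    = dedupMap (b.modify token [] (fun l => l ++ [ts])) := by
  rw [contains_dedupMap]
  simp only [PySem.Dict.modify]
  by_cases hc : b.contains token
  · obtain ⟨l, hl⟩ : ∃ l, b.get? token = some l := by
      rw [PySem.Dict.contains_eq_isSome_get?] at hc
      exact Option.isSome_iff_exists.mp hc
    have hgd : b.getD token [] = l := PySem.Dict.getD_of_get?_eq_some b [] hl
    have hgd' : (dedupMap b).getD token [] = PySem.List.dedup l := by
      rw [PySem.Dict.getD_eq_get?_getD, get?_dedupMap, hl]; rfl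
    rw [if_pos hc, hgd, hgd', dedupMap_insert, dedup_append_singleton]
    by_cases hm : ts ∈ l
    · rw [if_pos hm, if_pos (by simpa [PySem.List.mem_dedup] using hm)]
      exact (insert_self _ _ _ (by rw [keys_dedupMap]; exact hnd)
        (by rw [get?_dedupMap, hl]; rfl)).symm
    · rw [if_neg hm, if_neg (by simpa [PySem.List.mem_dedup] using hm)]
  · rw [if_neg hc,
      PySem.Dict.getD_of_not_contains b [] (by simpa using hc), dedupMap_insert]
    rfl

lemma inner_comm (ts : String) (tokens : List String) (b : PySem.Dict String (List String))
    (hnd : b.keys.Nodup) :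
    tokens.foldl (fun d token =>
        if d.contains token then
          if (d.getD token []).contains ts then d
          else d.insert token (d.getD token [] ++ [ts])
        else d.insert token [ts]) (dedupMap b)
    = dedupMap (tokens.foldl (fun d token => d.modify token [] (fun l => l ++ [ts])) b) := by
  induction tokens generalizing b with
  | nil => rfl
  | cons t rest ih =>
    simp only [List.foldl_cons]
    rw [step_comm ts b t hnd, ih _ (by
      simp only [PySem.Dict.modify]
      exact PySem.Dict.nodup_keys_insert _ _ _ hnd)]

lemma nodup_keys_inner (ts : String) (tokens : List String) (b : PySem.Dict String (List String))
    (hnd : b.keys.Nodup) :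
    (tokens.foldl (fun d token => d.modify token [] (fun l => l ++ [ts])) b).keys.Nodup := by
  induction tokens generalizing b with
  | nil => exact hnd
  | cons t rest ih =>
    simp only [List.foldl_cons]
    exact ih _ (by simp only [PySem.Dict.modify]; exact PySem.Dict.nodup_keys_insert _ _ _ hnd)

lemma outer_comm (lines : List (String × List String)) (b : PySem.Dict String (List String))
    (hnd : b.keys.Nodup) :
    lines.foldl (fun d line =>
        line.2.foldl (fun d token =>
          if d.contains token then
            if (d.getD token []).contains line.1 then d
            else d.insert token (d.getD token [] ++ [line.1])
          else d.insert token [line.1]) d) (dedupMap b)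
    = dedupMap (lines.foldl (fun d line =>
        line.2.foldl (fun d token => d.modify token [] (fun l => l ++ [line.1])) d) b) := by
  induction lines generalizing b with
  | nil => rfl
  | cons line rest ih =>
    simp only [List.foldl_cons]
    rw [inner_comm line.1 line.2 b hnd, ih _ (nodup_keys_inner line.1 line.2 b hnd)]

-- ===== VERDICT (by name: the statement is the Claim_ definition above) =====
theorem map_terms_to_timestamps_spec : Claim_equal_map_terms_to_timestamps := by
  intro lines _
  unfold Spec_map_terms_to_timestamps map_terms_to_timestamps map_terms_to_timestamps_alt
  rw [show (PySem.Dict.empty : PySem.Dict String (List String)) = dedupMap PySem.Dict.empty from rfl,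
    outer_comm lines PySem.Dict.empty PySem.Dict.nodup_keys_empty]
  rfl
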